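-- pv_equiv track=rewrite | github.com/Rhaoul/spiraton | scripts/gen_model_card.py | _first_nonempty_paragraph
-- ===== SOURCE A (Python) =====
-- def _first_nonempty_paragraph(md: str, max_chars: int = 280) -> str:
--     """
--     Grab a short excerpt from the first meaningful paragraph (non-empty, not a heading).
--     Keeps it short so MODEL_CARD stays readable.
--     """
--     lines = [ln.rstrip() for ln in md.splitlines()]
--     buf: list[str] = []
--     for ln in lines:
--         s = ln.strip()
--         if not s:
--             if buf:
--                 break
--             continue
--         # skip headings / horizontal rules
--         if s.startswith("#") or s in ("---", "___", "***"):
--             continue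
--         buf.append(s)
--         # stop early if already long
--         if sum(len(x) for x in buf) > max_chars:
--             break
--     excerpt = " ".join(buf).strip()
--     if len(excerpt) > max_chars:
--         excerpt = excerpt[: max_chars - 1].rstrip() + "…"
--     return excerpt if excerpt else "_(No excerpt found)_"
-- ===== SOURCE B (Python) =====
-- from itertools import dropwhile, takewhile
--
--
-- def _is_skippable(s: str) -> bool:
--     return s.startswith("#") or s in ("---", "___", "***")
--
--
-- def _first_nonempty_paragraph(md: str, max_chars: int = 280) -> str:
--     """Filter out headings/rules first, then take the first run of non-blank lines."""
--     kept = [s for s in (ln.strip() for ln in md.splitlines()) if not _is_skippable(s)]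
--     block = takewhile(bool, dropwhile(lambda s: not s, kept))
--     excerpt = " ".join(block).strip()
--     if len(excerpt) > max_chars:
--         excerpt = excerpt[: max_chars - 1].rstrip() + "…"
--     return excerpt if excerpt else "_(No excerpt found)_"
-- ===== Notes on version B (the rewrite author's own statement) =====
-- stated objective: simpler
-- what changed: Replaces A's stateful accumulate-with-early-break loop by a declarative pipeline: filter heading/rule lines out first, then take the first blank-delimited run of non-blank lines (dropwhile/takewhile) and truncate the joined text once at the end.
-- outside the precondition, e.g. on _first_nonempty_paragraph('ab\ncd', 0): A returns 'a…', B returns 'ab c…'; on _first_nonempty_paragraph('ab\ncd', -1): A returns '…', B returns 'ab…'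
import Mathlib
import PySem

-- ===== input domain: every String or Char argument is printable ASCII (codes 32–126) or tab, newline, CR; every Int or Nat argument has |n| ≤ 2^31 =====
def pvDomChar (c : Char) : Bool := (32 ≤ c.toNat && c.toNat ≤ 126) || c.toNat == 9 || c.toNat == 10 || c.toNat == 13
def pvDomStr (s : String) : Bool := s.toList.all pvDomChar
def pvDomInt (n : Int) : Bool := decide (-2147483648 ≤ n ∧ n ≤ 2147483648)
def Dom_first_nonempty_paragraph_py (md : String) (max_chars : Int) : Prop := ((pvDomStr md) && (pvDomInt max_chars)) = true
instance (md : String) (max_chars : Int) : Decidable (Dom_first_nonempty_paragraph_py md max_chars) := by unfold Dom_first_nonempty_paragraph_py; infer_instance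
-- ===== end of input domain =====

-- B replaces A's stateful accumulate-with-early-break loop by a filter → dropWhile → takeWhile
-- pipeline with one final truncation (objective: simpler); equal on Pre_ (1 ≤ max_chars).


-- ===== PORT A =====
-- A's 'for ln in lines' loop: state is buf; a blank line breaks iff buf is nonempty,
-- heading / rule lines are skipped, otherwise the stripped line is appended and the
-- loop stops early once the accumulated length exceeds max_chars.
def pvLoopA (mc : Int) : List String → List String → List String
  | [], buf => buf
  | ln :: rest, buf =>
    let s := PySem.Str.strip ln
    if s = "" then (if buf ≠ [] then buf else pvLoopA mc rest buf)
    else if PySem.Str.startswith s "#" || s == "---" || s == "___" || s == "***" then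
      pvLoopA mc rest buf
    else
      let buf' := buf ++ [s]
      if (buf'.map PySem.Str.len).sum > mc then buf' else pvLoopA mc rest buf'

def first_nonempty_paragraph_py (md : String) (max_chars : Int) : String :=
  let lines := (PySem.Str.splitlines md).map PySem.Str.rstrip
  let buf := pvLoopA max_chars lines []
  let excerpt := PySem.Str.strip (PySem.Str.join " " buf)
  let excerpt :=
    if PySem.Str.len excerpt > max_chars then
      PySem.Str.rstrip (PySem.Str.slice excerpt none (some (max_chars - 1))) ++ "…"
    else excerpt
  if excerpt ≠ "" then excerpt else "_(No excerpt found)_"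

-- ===== PORT B =====
def pvSkippable (s : String) : Bool :=
  PySem.Str.startswith s "#" || s == "---" || s == "___" || s == "***"

def first_nonempty_paragraph_py_alt (md : String) (max_chars : Int) : String :=
  let kept := ((PySem.Str.splitlines md).map PySem.Str.strip).filter (fun s => !pvSkippable s)
  let block := (kept.dropWhile (fun s => s == "")).takeWhile (fun s => !(s == ""))
  let excerpt := PySem.Str.strip (PySem.Str.join " " block)
  let excerpt :=
    if PySem.Str.len excerpt > max_chars then
      PySem.Str.rstrip (PySem.Str.slice excerpt none (some (max_chars - 1))) ++ "…"
    else excerpt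
  if excerpt ≠ "" then excerpt else "_(No excerpt found)_"

-- ===== PRECONDITION & SPEC =====
-- Pre_ excludes max_chars ≤ 0 (A still returns there): the truncation slice
-- excerpt[:max_chars - 1] then counts from the END of the string, so the returned value
-- depends on how much of the paragraph each implementation happened to gather before
-- truncating — an accidental corner value that no caller would specify.
def Pre_first_nonempty_paragraph_py (_md : String) (max_chars : Int) : Prop := 1 ≤ max_chars
instance (md : String) (max_chars : Int) : Decidable (Pre_first_nonempty_paragraph_py md max_chars) := by unfold Pre_first_nonempty_paragraph_py; infer_instance

def pvWitness_first_nonempty_paragraph_py : String × Int := ("# Title\n\nHello world.", 280)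

def Spec_first_nonempty_paragraph_py (md : String) (max_chars : Int) (out : String) : Prop := out = first_nonempty_paragraph_py_alt md max_chars
instance (md : String) (max_chars : Int) (out : String) : Decidable (Spec_first_nonempty_paragraph_py md max_chars out) := by unfold Spec_first_nonempty_paragraph_py; infer_instance

-- ===== CLAIM (what is proved, stated in full; the proofs are below) =====
def Claim_equal_first_nonempty_paragraph_py : Prop := ∀ (md : String) (max_chars : Int), Dom_first_nonempty_paragraph_py md max_chars → Pre_first_nonempty_paragraph_py md max_chars → Spec_first_nonempty_paragraph_py md max_chars (first_nonempty_paragraph_py md max_chars)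

-- ===== LEMMAS AND PROOFS =====

-- A's loop restated on the pre-stripped line list
def pvCore (mc : Int) : List String → List String → List String
  | [], buf => buf
  | s :: rest, buf =>
    if s = "" then (if buf ≠ [] then buf else pvCore mc rest buf)
    else if pvSkippable s then pvCore mc rest buf
    else
      let buf' := buf ++ [s]
      if (buf'.map PySem.Str.len).sum > mc then buf' else pvCore mc rest buf'

-- the greedy prefix that A's early break keeps
def pvCut (mc : Int) (acc : Int) : List String → List String
  | [] => []
  | x :: xs => if acc + PySem.Str.len x > mc then [x] else x :: pvCut mc (acc + PySem.Str.len x) xs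

-- the first run of non-blank lines after removing heading/rule lines (what B selects)
def pvBlock (S : List String) : List String :=
  ((S.filter (fun s => !pvSkippable s)).dropWhile (fun s => s == "")).takeWhile (fun s => !(s == ""))

-- the shared tail of both ports: join, truncate, fallback
def pvFinalize (mc : Int) (b : List String) : String :=
  let excerpt := PySem.Str.strip (PySem.Str.join " " b)
  let excerpt :=
    if PySem.Str.len excerpt > mc then
      PySem.Str.rstrip (PySem.Str.slice excerpt none (some (mc - 1))) ++ "…"
    else excerpt
  if excerpt ≠ "" then excerpt else "_(No excerpt found)_"

-- ---- generic whitespace-stripping facts ----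

lemma rstrip_eq (l : List Char) : PySem.Chars.rstrip l = List.rdropWhile PySem.Chars.isspace l := rfl
lemma lstrip_eq (l : List Char) : PySem.Chars.lstrip l = List.dropWhile PySem.Chars.isspace l := rfl

lemma rdropWhile_cons_of_exists {α : Type} (p : α → Bool) (a : α) (t : List α)
    (h : ∃ x ∈ t, ¬ p x) : List.rdropWhile p (a :: t) = a :: List.rdropWhile p t := by
  have hne : (List.dropWhile p t.reverse).isEmpty = false := by
    obtain ⟨x, hx, hpx⟩ := h
    rw [List.isEmpty_eq_false_iff, Ne, List.dropWhile_eq_nil_iff]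
    intro hc
    exact hpx (hc x (List.mem_reverse.mpr hx))
  simp only [List.rdropWhile, List.reverse_cons, List.dropWhile_append, hne, Bool.false_eq_true,
    if_false, List.reverse_append]
  simp

lemma rdropWhile_head_cons {α : Type} (p : α → Bool) (a : α) (t : List α) (hpa : ¬ p a) :
    ∃ w, List.rdropWhile p (a :: t) = a :: w := by
  have hne : List.rdropWhile p (a :: t) ≠ [] := by
    intro hc
    exact hpa (List.rdropWhile_eq_nil_iff.mp hc a (by simp))
  obtain ⟨u, hu⟩ := List.rdropWhile_prefix p (l := a :: t)
  cases hrd : List.rdropWhile p (a :: t) with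
  | nil => exact absurd hrd hne
  | cons b w =>
    rw [hrd] at hu
    simp only [List.cons_append, List.cons.injEq] at hu
    exact ⟨w, by rw [hu.1]⟩

lemma dropWhile_rdropWhile_comm (p : Char → Bool) (l : List Char) :
    List.dropWhile p (List.rdropWhile p l) = List.rdropWhile p (List.dropWhile p l) := by
  induction l with
  | nil => rfl
  | cons a t ih =>
    by_cases hpa : p a
    · by_cases hall : ∀ x ∈ t, p x
      · have h1 : List.rdropWhile p (a :: t) = [] := by
          rw [List.rdropWhile_eq_nil_iff]
          intro x hx
          rcases List.mem_cons.mp hx with rfl | hx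
          · exact hpa
          · exact hall x hx
        have h2 : List.dropWhile p (a :: t) = [] := by
          rw [List.dropWhile_eq_nil_iff]
          intro x hx
          rcases List.mem_cons.mp hx with rfl | hx
          · exact hpa
          · exact hall x hx
        simp [h1, h2]
      · rw [rdropWhile_cons_of_exists p a t (by simpa using hall),
          List.dropWhile_cons_of_pos hpa, List.dropWhile_cons_of_pos hpa, ih]
    · obtain ⟨w, hw⟩ := rdropWhile_head_cons p a t hpa
      rw [List.dropWhile_cons_of_neg hpa, hw, List.dropWhile_cons_of_neg hpa, ← hw]

lemma chars_strip_rstrip (l : List Char) :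
    PySem.Chars.strip (PySem.Chars.rstrip l) = PySem.Chars.strip l := by
  simp only [PySem.Chars.strip, rstrip_eq, lstrip_eq, dropWhile_rdropWhile_comm,
    List.rdropWhile_idempotent]

lemma strip_rstrip (s : String) : PySem.Str.strip (PySem.Str.rstrip s) = PySem.Str.strip s := by
  apply String.toList_inj.mp
  rw [PySem.Str.toList_strip, PySem.Str.toList_strip, PySem.Str.toList_rstrip, chars_strip_rstrip]

lemma chars_strip_strip (l : List Char) :
    PySem.Chars.strip (PySem.Chars.strip l) = PySem.Chars.strip l := by
  simp only [PySem.Chars.strip, rstrip_eq, lstrip_eq, dropWhile_rdropWhile_comm,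
    List.dropWhile_idempotent, List.rdropWhile_idempotent]

lemma strip_strip (s : String) : PySem.Str.strip (PySem.Str.strip s) = PySem.Str.strip s := by
  apply String.toList_inj.mp
  rw [PySem.Str.toList_strip, PySem.Str.toList_strip, chars_strip_strip]

lemma strip_fixed_parts (x : List Char) (h : PySem.Chars.strip x = x) :
    PySem.Chars.lstrip x = x ∧ PySem.Chars.rstrip x = x := by
  have h1 : (PySem.Chars.lstrip x).length ≤ x.length := List.length_dropWhile_le _ _
  have h2 : (PySem.Chars.strip x).length ≤ (PySem.Chars.lstrip x).length := by
    show (PySem.Chars.rstrip (PySem.Chars.lstrip x)).length ≤ _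
    rw [rstrip_eq]
    exact (List.rdropWhile_prefix _ _).length_le
  have hlen : (PySem.Chars.lstrip x).length = x.length := by rw [h] at h2; omega
  have hl : PySem.Chars.lstrip x = x := (List.dropWhile_suffix _).eq_of_length hlen
  refine ⟨hl, ?_⟩
  have h3 : PySem.Chars.rstrip (PySem.Chars.lstrip x) = x := h
  rwa [hl] at h3

lemma lstrip_append_fixed (x r : List Char) (hx : x ≠ []) (h : PySem.Chars.lstrip x = x) :
    PySem.Chars.lstrip (x ++ r) = x ++ r := by
  cases x with
  | nil => exact absurd rfl hx
  | cons c t =>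
    have hc : ¬ PySem.Chars.isspace c := by
      intro hpc
      have hlen := congrArg List.length h
      rw [lstrip_eq, List.dropWhile_cons_of_pos hpc] at hlen
      have hle := List.length_dropWhile_le PySem.Chars.isspace t
      simp at hlen; omega
    rw [lstrip_eq, List.cons_append, List.dropWhile_cons_of_neg hc]

lemma rstrip_append_fixed (l x : List Char) (hx : x ≠ []) (h : PySem.Chars.rstrip x = x) :
    PySem.Chars.rstrip (l ++ x) = l ++ x := by
  have hlast : ¬ PySem.Chars.isspace (x.getLast hx) := by
    rw [rstrip_eq] at h
    exact List.rdropWhile_eq_self_iff.mp h hx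
  rw [rstrip_eq]
  apply List.rdropWhile_eq_self_iff.mpr
  intro hl
  rw [List.getLast_append_right hx]
  exact hlast

-- ---- join facts ----

lemma join_append_chars (sep : List Char) (L1 L2 : List (List Char)) (h : L1 ≠ []) :
    PySem.Chars.join sep (L1 ++ L2) =
      PySem.Chars.join sep L1 ++ (if L2 = [] then [] else sep ++ PySem.Chars.join sep L2) := by
  induction L1 with
  | nil => exact absurd rfl h
  | cons a L1' ih =>
    cases L1' with
    | nil =>
      cases L2 with
      | nil => simp [PySem.Chars.join_singleton]
      | cons b l2 => simp [PySem.Chars.join_cons_cons, PySem.Chars.join_singleton, List.append_assoc]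
    | cons b rest =>
      have hs : (b :: rest) ++ L2 = b :: (rest ++ L2) := rfl
      rw [show (a :: b :: rest) ++ L2 = a :: b :: (rest ++ L2) from rfl,
        PySem.Chars.join_cons_cons, PySem.Chars.join_cons_cons, ← hs,
        ih (by simp)]
      simp [List.append_assoc]

lemma strip_join_fixed_chars (L : List (List Char)) (hne : L ≠ [])
    (h : ∀ x ∈ L, x ≠ [] ∧ PySem.Chars.strip x = x) :
    PySem.Chars.strip (PySem.Chars.join [' '] L) = PySem.Chars.join [' '] L := by
  show PySem.Chars.rstrip (PySem.Chars.lstrip _) = _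
  have hl : PySem.Chars.lstrip (PySem.Chars.join [' '] L) = PySem.Chars.join [' '] L := by
    cases L with
    | nil => exact absurd rfl hne
    | cons a L' =>
      obtain ⟨ha, hsa⟩ := h a (by simp)
      have hfix := (strip_fixed_parts a hsa).1
      cases L' with
      | nil =>
        rw [PySem.Chars.join_singleton]
        have h2 := lstrip_append_fixed a [] ha hfix
        simpa using h2
      | cons b rest =>
        rw [PySem.Chars.join_cons_cons, List.append_assoc]
        exact lstrip_append_fixed a _ ha hfix
  rw [hl]
  obtain rfl | ⟨L', y, rfl⟩ := List.eq_nil_or_concat L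
  · exact absurd rfl hne
  · obtain ⟨hy, hsy⟩ := h y (by simp)
    have hry := (strip_fixed_parts y hsy).2
    cases L' with
    | nil =>
      have h2 := rstrip_append_fixed [] y hy hry
      simpa [PySem.Chars.join_singleton] using h2
    | cons a rest =>
      rw [show (a :: rest).concat y = (a :: rest) ++ [y] from by simp,
        join_append_chars _ _ _ (by simp)]
      simp only [if_neg (by simp : ¬([y] : List (List Char)) = []), PySem.Chars.join_singleton]
      rw [← List.append_assoc]
      exact rstrip_append_fixed _ y hy hry

lemma sum_le_len_join_chars (L : List (List Char)) :
    (L.map List.length).sum ≤ (PySem.Chars.join [' '] L).length := by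
  induction L with
  | nil => simp [PySem.Chars.join_nil]
  | cons a L' ih =>
    cases L' with
    | nil => simp [PySem.Chars.join_singleton]
    | cons b rest =>
      rw [PySem.Chars.join_cons_cons]
      simp only [List.map_cons, List.sum_cons, List.length_append] at *
      omega

lemma join_prefix_chars (c t : List (List Char)) :
    PySem.Chars.join [' '] c <+: PySem.Chars.join [' '] (c ++ t) := by
  cases hc : c with
  | nil => simp [PySem.Chars.join_nil]
  | cons a c' =>
    cases t with
    | nil => simp
    | cons b t' =>
      rw [join_append_chars [' '] (a :: c') (b :: t') (by simp)]
      exact ⟨_, rfl⟩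

-- ---- String-level wrappers ----

lemma strip_join_fixed_str (parts : List String) (hne : parts ≠ [])
    (h : ∀ s ∈ parts, s ≠ "" ∧ PySem.Str.strip s = s) :
    PySem.Str.strip (PySem.Str.join " " parts) = PySem.Str.join " " parts := by
  apply String.toList_inj.mp
  rw [PySem.Str.toList_strip, PySem.Str.toList_join]
  rw [show (" " : String).toList = [' '] from rfl]
  apply strip_join_fixed_chars
  · simpa using hne
  · intro x hx
    obtain ⟨s, hs, rfl⟩ := List.mem_map.mp hx
    obtain ⟨h1, h2⟩ := h s hs
    refine ⟨by simpa using h1, ?_⟩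
    rw [← PySem.Str.toList_strip, h2]

lemma sum_le_len_join_str (parts : List String) :
    (parts.map PySem.Str.len).sum ≤ PySem.Str.len (PySem.Str.join " " parts) := by
  have h1 := sum_le_len_join_chars (parts.map String.toList)
  rw [PySem.Str.len_eq, PySem.Str.toList_join, show (" " : String).toList = [' '] from rfl]
  have h2 : parts.map PySem.Str.len
      = (parts.map String.toList).map (fun l => ((l.length : Nat) : Int)) := by
    simp [PySem.Str.len_eq]
  rw [h2, show (fun l : List Char => ((l.length : Nat) : Int))
      = (fun n : Nat => (n : Int)) ∘ List.length from rfl,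
    ← List.map_map, ← Nat.cast_list_sum]
  exact_mod_cast h1

-- ---- loop characterisation ----

lemma loopA_eq_core (mc : Int) (ls : List String) (buf : List String) :
    pvLoopA mc ls buf = pvCore mc (ls.map PySem.Str.strip) buf := by
  induction ls generalizing buf with
  | nil => rfl
  | cons ln rest ih => simp only [pvLoopA, pvCore, List.map_cons, pvSkippable]; split_ifs <;> simp [ih]

lemma skippable_empty : pvSkippable "" = false := by decide

lemma core_cons_blank (mc : Int) (rest buf : List String) (hbuf : buf ≠ []) :
    pvCore mc ("" :: rest) buf = buf := by simp [pvCore, hbuf]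

lemma core_cons_skip (mc : Int) (s : String) (rest buf : List String)
    (hs : s ≠ "") (hsk : pvSkippable s = true) :
    pvCore mc (s :: rest) buf = pvCore mc rest buf := by simp [pvCore, hs, hsk]

lemma core_cons_real (mc : Int) (s : String) (rest buf : List String)
    (hs : s ≠ "") (hsk : pvSkippable s = false) :
    pvCore mc (s :: rest) buf =
      (if (List.map PySem.Str.len (buf ++ [s])).sum > mc then buf ++ [s]
       else pvCore mc rest (buf ++ [s])) := by
  simp [pvCore, hs, hsk]

lemma cut_cons (mc acc : Int) (x : String) (xs : List String) :
    pvCut mc acc (x :: xs) =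
      (if acc + PySem.Str.len x > mc then [x] else x :: pvCut mc (acc + PySem.Str.len x) xs) := rfl

lemma core_phase2 (mc : Int) (S : List String) (buf : List String) (hbuf : buf ≠ []) :
    pvCore mc S buf =
      buf ++ pvCut mc ((buf.map PySem.Str.len).sum)
        ((S.filter (fun s => !pvSkippable s)).takeWhile (fun s => !(s == ""))) := by
  induction S generalizing buf with
  | nil => simp [pvCore, pvCut]
  | cons s rest ih =>
    by_cases hs : s = ""
    · subst hs
      rw [core_cons_blank mc rest buf hbuf]
      simp [skippable_empty, pvCut]
    · have hsb : (s == "") = false := by simpa using hs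
      by_cases hsk : pvSkippable s
      · rw [core_cons_skip mc s rest buf hs hsk, ih buf hbuf]
        simp [hsk]
      · rw [core_cons_real mc s rest buf hs (by simpa using hsk)]
        have hsum : (List.map PySem.Str.len (buf ++ [s])).sum
            = (List.map PySem.Str.len buf).sum + PySem.Str.len s := by
          simp [List.sum_append]
        rw [List.filter_cons_of_pos (by simp [hsk]), List.takeWhile_cons_of_pos (by simp [hsb]),
          cut_cons]
        by_cases hlong : (List.map PySem.Str.len (buf ++ [s])).sum > mc
        · rw [if_pos hlong, if_pos (by rw [← hsum]; exact hlong)]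
        · rw [if_neg hlong, if_neg (by rw [← hsum]; exact hlong), ih _ (by simp), hsum]
          simp

lemma core_spec (mc : Int) (S : List String) :
    pvCore mc S [] = pvCut mc 0 (pvBlock S) := by
  induction S with
  | nil => rfl
  | cons s rest ih =>
    by_cases hs : s = ""
    · subst hs
      have h1 : pvCore mc ("" :: rest) ([] : List String) = pvCore mc rest [] := by
        simp [pvCore]
      rw [h1, ih]
      simp [pvBlock, skippable_empty]
    · have hsb : (s == "") = false := by simpa using hs
      by_cases hsk : pvSkippable s
      · rw [core_cons_skip mc s rest [] hs hsk, ih]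
        simp [pvBlock, hsk]
      · rw [core_cons_real mc s rest [] hs (by simpa using hsk)]
        have hblk : pvBlock (s :: rest) =
            s :: (rest.filter (fun s => !pvSkippable s)).takeWhile (fun s => !(s == "")) := by
          unfold pvBlock
          rw [List.filter_cons_of_pos (by simp [hsk])]
          rw [List.dropWhile_cons_of_neg (by simp [hsb])]
          rw [List.takeWhile_cons_of_pos (by simp [hsb])]
        rw [hblk, cut_cons]
        have hsum : (List.map PySem.Str.len (([] : List String) ++ [s])).sum
            = 0 + PySem.Str.len s := by simp
        by_cases hlong : (List.map PySem.Str.len (([] : List String) ++ [s])).sum > mc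
        · rw [if_pos hlong, if_pos (by rw [← hsum]; exact hlong)]
          rfl
        · rw [if_neg hlong, if_neg (by rw [← hsum]; exact hlong)]
          show pvCore mc rest [s] = _
          rw [core_phase2 mc rest [s] (by simp)]
          simp

lemma cut_cases (mc : Int) (l : List String) (acc : Int) :
    pvCut mc acc l = l ∨
      (pvCut mc acc l <+: l ∧ acc + ((pvCut mc acc l).map PySem.Str.len).sum > mc) := by
  induction l generalizing acc with
  | nil => exact Or.inl rfl
  | cons x xs ih =>
    by_cases h : acc + PySem.Str.len x > mc
    · refine Or.inr ?_
      simp only [pvCut, if_pos h]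
      exact ⟨⟨xs, rfl⟩, by simpa using h⟩
    · rcases ih (acc + PySem.Str.len x) with h1 | ⟨h1, h2⟩
      · refine Or.inl ?_
        simp only [pvCut, if_neg h]
        rw [h1]
      · refine Or.inr ?_
        simp only [pvCut, if_neg h]
        refine ⟨?_, by simp only [List.map_cons, List.sum_cons]; omega⟩
        obtain ⟨t, ht⟩ := h1
        exact ⟨t, by rw [List.cons_append, ht]⟩

lemma block_elem (S : List String) (hS : ∀ s ∈ S, PySem.Str.strip s = s) :
    ∀ s ∈ pvBlock S, s ≠ "" ∧ PySem.Str.strip s = s := by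
  intro s hs
  have h1 := List.mem_takeWhile_imp hs
  have h2 : s ∈ S :=
    ((List.takeWhile_sublist _).trans
      ((List.dropWhile_sublist _).trans List.filter_sublist)).mem hs
  exact ⟨by simpa using h1, hS s h2⟩

-- ---- the final truncation ignores A's early break ----

lemma finalize_cut (mc : Int) (hmc : 1 ≤ mc) (BL : List String)
    (helem : ∀ s ∈ BL, s ≠ "" ∧ PySem.Str.strip s = s) :
    pvFinalize mc (pvCut mc 0 BL) = pvFinalize mc BL := by
  rcases cut_cases mc BL 0 with heq | ⟨hpre, hsum⟩
  · rw [heq]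
  · have hcne : pvCut mc 0 BL ≠ [] := by
      intro h0; rw [h0] at hsum; simp at hsum; omega
    obtain ⟨t, ht⟩ := hpre
    have hBLne : BL ≠ [] := by rw [← ht]; simp [hcne]
    have helc : ∀ s ∈ pvCut mc 0 BL, s ≠ "" ∧ PySem.Str.strip s = s := by
      intro s hs
      exact helem s (ht ▸ List.mem_append_left t hs)
    have hA1 := strip_join_fixed_str _ hcne helc
    have hB1 := strip_join_fixed_str _ hBLne helem
    have hsumlen := sum_le_len_join_str (pvCut mc 0 BL)
    have hgtc : PySem.Str.len (PySem.Str.join " " (pvCut mc 0 BL)) > mc := by omega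
    have hprej : (PySem.Str.join " " (pvCut mc 0 BL)).toList
        <+: (PySem.Str.join " " BL).toList := by
      conv_rhs => rw [← ht]
      rw [PySem.Str.toList_join, PySem.Str.toList_join,
        show (" " : String).toList = [' '] from rfl, List.map_append]
      exact join_prefix_chars _ _
    have hgtBL : PySem.Str.len (PySem.Str.join " " BL) > mc := by
      have hle := hprej.length_le
      rw [PySem.Str.len_eq] at hgtc ⊢
      omega
    simp only [pvFinalize]
    rw [hA1, hB1, if_pos hgtc, if_pos hgtBL]
    have hslice : PySem.Str.slice (PySem.Str.join " " (pvCut mc 0 BL)) none (some (mc - 1))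
        = PySem.Str.slice (PySem.Str.join " " BL) none (some (mc - 1)) := by
      apply String.toList_inj.mp
      rw [PySem.Str.toList_slice, PySem.Str.toList_slice, PySem.Chars.slice_eq_listSlice,
        PySem.Chars.slice_eq_listSlice, PySem.List.slice_to _ (by omega),
        PySem.List.slice_to _ (by omega)]
      obtain ⟨t2, ht2⟩ := hprej
      have hlen : (mc - 1).toNat ≤ (PySem.Str.join " " (pvCut mc 0 BL)).toList.length := by
        rw [PySem.Str.len_eq] at hgtc
        omega
      rw [← ht2, List.take_append_of_le_length hlen]
    rw [hslice]

-- ===== VERDICT (by name: the statement is the Claim_ definition above) =====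
theorem first_nonempty_paragraph_py_spec : Claim_equal_first_nonempty_paragraph_py := by
  intro md mc _hdom hpre
  unfold Spec_first_nonempty_paragraph_py
  have hmap : ((PySem.Str.splitlines md).map PySem.Str.rstrip).map PySem.Str.strip
      = (PySem.Str.splitlines md).map PySem.Str.strip := by
    rw [List.map_map]
    exact List.map_congr_left fun x _ => by simp [Function.comp, strip_rstrip]
  have hA : first_nonempty_paragraph_py md mc
      = pvFinalize mc (pvCut mc 0 (pvBlock ((PySem.Str.splitlines md).map PySem.Str.strip))) := by
    show pvFinalize mc (pvLoopA mc ((PySem.Str.splitlines md).map PySem.Str.rstrip) []) = _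
    rw [loopA_eq_core, hmap, core_spec]
  have hB : first_nonempty_paragraph_py_alt md mc
      = pvFinalize mc (pvBlock ((PySem.Str.splitlines md).map PySem.Str.strip)) := rfl
  rw [hA, hB]
  apply finalize_cut mc hpre
  apply block_elem
  intro s hs
  obtain ⟨x, _, rfl⟩ := List.mem_map.mp hs
  exact strip_strip x
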